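-- pv_equiv track=rewrite | github.com/kit8nino/2023-python | ИС34/Крылов Константин/[3] лаба 3.py | points_start_end
-- ===== SOURCE A (Python) =====
-- def points_start_end(maze):
--     start = None
--     end = None
--     for y in range(len(maze[0])):
--         if maze[0][y]==" ":
--             start=(0,y)
--         if maze[len(maze)-1][y]==" ":
--             end=((len(maze)-1),y)
--     return start,end
-- ===== SOURCE B (Python) =====
-- def points_start_end(maze):
--     top = maze[0]
--     bottom = maze[len(maze) - 1]
--     start = None
--     for y in range(len(top) - 1, -1, -1):
--         if top[y] == " ":
--             start = (0, y)
--             break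
--     end = None
--     for y in range(len(top) - 1, -1, -1):
--         if bottom[y] == " ":
--             end = (len(maze) - 1, y)
--             break
--     return start, end
-- ===== Notes on version B (the rewrite author's own statement) =====
-- stated objective: alternative
-- what changed: Replaces A's single forward pass that keeps overwriting start/end with the last seen space by two independent right-to-left searches over the top and bottom rows that stop at the first space found (early exit).
import Mathlib
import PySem

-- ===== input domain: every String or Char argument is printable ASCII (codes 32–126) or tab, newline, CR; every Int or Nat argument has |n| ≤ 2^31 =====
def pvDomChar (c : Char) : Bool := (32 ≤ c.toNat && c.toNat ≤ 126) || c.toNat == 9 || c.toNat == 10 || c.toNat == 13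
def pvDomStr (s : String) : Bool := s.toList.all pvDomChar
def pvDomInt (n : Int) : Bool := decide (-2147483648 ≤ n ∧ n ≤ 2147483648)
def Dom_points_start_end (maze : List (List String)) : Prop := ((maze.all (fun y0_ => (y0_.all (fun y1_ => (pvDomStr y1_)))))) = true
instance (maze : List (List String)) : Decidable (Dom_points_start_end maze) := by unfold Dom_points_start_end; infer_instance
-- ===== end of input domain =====

-- B replaces A's single forward overwrite loop by two independent right-to-left
-- searches with early exit (same cost class; objective: alternative decomposition).

-- ===== PORT A =====
-- one forward pass over range(len(maze[0])); start/end overwritten at each space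
def points_start_end (maze : List (List String)) : (Option (Int × Int)) × (Option (Int × Int)) :=
  (PySem.List.pyRange 0 ((PySem.List.pyGetD maze 0 []).length : Int) 1).foldl
    (fun (se : Option (Int × Int) × Option (Int × Int)) y =>
      let se1 := if PySem.List.pyGetD (PySem.List.pyGetD maze 0 []) y "" == " " then
                   (some ((0 : Int), y), se.2) else se
      if PySem.List.pyGetD (PySem.List.pyGetD maze ((maze.length : Int) - 1) []) y "" == " " then
        (se1.1, some (((maze.length : Int) - 1), y)) else se1)
    (none, none)

-- ===== PORT B =====
-- two independent right-to-left searches, each stopping at the first space (break ≙ find?)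
def points_start_end_alt (maze : List (List String)) : (Option (Int × Int)) × (Option (Int × Int)) :=
  let top := PySem.List.pyGetD maze 0 []
  let bottom := PySem.List.pyGetD maze ((maze.length : Int) - 1) []
  let ys := PySem.List.pyRange ((top.length : Int) - 1) (-1) (-1)
  let start := (ys.find? (fun y => PySem.List.pyGetD top y "" == " ")).map (fun y => ((0 : Int), y))
  let stop := (ys.find? (fun y => PySem.List.pyGetD bottom y "" == " ")).map
                (fun y => (((maze.length : Int) - 1), y))
  (start, stop)

-- ===== PRECONDITION & SPEC =====
-- Pre_ excludes exactly the inputs where the Python A raises IndexError: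
-- the empty maze (maze[0]) and a bottom row shorter than the top row (maze[-1][y]).
def Pre_points_start_end (maze : List (List String)) : Prop :=
  maze ≠ [] ∧ (maze.headD []).length ≤ (maze.getLastD []).length
instance (maze : List (List String)) : Decidable (Pre_points_start_end maze) := by
  unfold Pre_points_start_end; infer_instance

def pvWitness_points_start_end : List (List String) := [["#", " ", "#"], [" ", "#", " "]]

def Spec_points_start_end (maze : List (List String)) (out : (Option (Int × Int)) × (Option (Int × Int))) : Prop := out = points_start_end_alt maze
instance (maze : List (List String)) (out : (Option (Int × Int)) × (Option (Int × Int))) : Decidable (Spec_points_start_end maze out) := by unfold Spec_points_start_end; infer_instance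

-- ===== CLAIM (what is proved, stated in full; the proofs are below) =====
def Claim_equal_points_start_end : Prop := ∀ (maze : List (List String)), Dom_points_start_end maze → Pre_points_start_end maze → Spec_points_start_end maze (points_start_end maze)

-- ===== LEMMAS AND PROOFS =====

-- A's loop body updates the two components independently, so the loop splits
-- into two independent "keep the last y with P y" folds
lemma split_loop {α : Type} (P1 P2 : Int → Bool) (f1 f2 : Int → α) :
    ∀ (l : List Int) (a b : Option α),
      l.foldl (fun se y =>
          let se1 := if P1 y then (some (f1 y), se.2) else se
          if P2 y then (se1.1, some (f2 y)) else se1) (a, b)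
        = (l.foldl (fun s y => if P1 y then some (f1 y) else s) a,
           l.foldl (fun s y => if P2 y then some (f2 y) else s) b) := by
  intro l
  induction l with
  | nil => intro a b; rfl
  | cons x xs ih =>
      intro a b
      by_cases h1 : P1 x <;> by_cases h2 : P2 x <;> simp [List.foldl_cons, h1, h2, ih]

-- "keep the last y with P y" over l = "first y with P y" over l.reverse
lemma foldl_last_if {α : Type} (P : Int → Bool) (f : Int → α) :
    ∀ (l : List Int) (init : Option α),
      l.foldl (fun s y => if P y then some (f y) else s) init
        = (l.reverse.find? P).elim init (fun y => some (f y)) := by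
  intro l
  induction l with
  | nil => intro init; rfl
  | cons x xs ih =>
      intro init
      simp only [List.foldl_cons, List.reverse_cons, List.find?_append, ih]
      cases h : xs.reverse.find? P with
      | some y => simp
      | none =>
          cases hx : P x <;> simp [List.find?, hx]

theorem points_start_end_spec : Claim_equal_points_start_end := by
  intro maze _ _
  unfold Spec_points_start_end points_start_end points_start_end_alt
  dsimp only
  rw [split_loop, foldl_last_if, foldl_last_if,
      PySem.List.pyRange_neg_one_eq_reverse]
  have h0 : ((PySem.List.pyGetD maze 0 []).length : Int) - 1 + 1
      = ((PySem.List.pyGetD maze 0 []).length : Int) := by ring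
  rw [h0]
  norm_num
  cases (PySem.List.pyRange 0 ((PySem.List.pyGetD maze 0 []).length : Int) 1).reverse.find?
      (fun y => PySem.List.pyGetD (PySem.List.pyGetD maze 0 []) y "" == " ") <;>
    cases (PySem.List.pyRange 0 ((PySem.List.pyGetD maze 0 []).length : Int) 1).reverse.find?
        (fun y => PySem.List.pyGetD (PySem.List.pyGetD maze ((maze.length : Int) - 1) []) y "" == " ") <;>
      exact ⟨rfl, rfl⟩
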